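-- pv_equiv track=rewrite | github.com/baddoor/Syro | scripts/generate_anki_test_data.py | generate_anki_clozes
-- ===== SOURCE A (Python) =====
-- def generate_anki_clozes(count=10000, clozes_per_line=10):
--     content = "# Stress Test Anki Cloze\n\n"
--     # Each logical block gives clozes_per_line cards
--     blocks_needed = count // clozes_per_line
--
--     global_card_index = 1
--     for i in range(blocks_needed):
--         # We want clozes_per_line IDs (c1 to cN) in one block
--         # According to the user: "一行内部添加十张Cloze id的卡，然后带有两个换行符用来分割 id"
--         # Since Syro parses clozes in the same file/note, we can separate them by \n\n
--         block_parts = []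
--         for j in range(clozes_per_line):
--             cloze_id = j + 1
--             block_parts.append(f"Anki Card {global_card_index}: {{{{c{cloze_id}::Test Answer {global_card_index}}}}}")
--             global_card_index += 1
--
--         # Join with dual newlines
--         line_content = "\n\n".join(block_parts)
--         content += line_content + "\n\n---\n\n"
--
--     return content
-- ===== SOURCE B (Python) =====
-- def generate_anki_clozes(count=10000, clozes_per_line=10):
--     header = "# Stress Test Anki Cloze\n\n"
--     blocks_needed = count // clozes_per_line
--     if blocks_needed <= 0:
--         return header
--     parts = []
--     for g in range(1, blocks_needed * clozes_per_line + 1):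
--         cloze_id = (g - 1) % clozes_per_line + 1
--         parts.append(f"Anki Card {g}: {{{{c{cloze_id}::Test Answer {g}}}}}")
--         parts.append("\n\n---\n\n" if g % clozes_per_line == 0 else "\n\n")
--     return header + "".join(parts)
-- ===== Notes on version B (the rewrite author's own statement) =====
-- stated objective: simpler
-- what changed: Replaces the nested block/card loops with per-block list building and joining by a single flat loop over global card indices that derives the cloze id by modular arithmetic and appends the right separator ('\n\n' inside a block, '\n\n---\n\n' after the last card of a block) per card, joining once at the end.
-- intended difference: When count <= clozes_per_line <= -1 (a nonsensical negative block size), A's empty inner loop returns the header plus phantom card-less separator-only '\n\n---\n\n' blocks, while B returns the bare header — the natural choice on this unspecified corner, since no card can be emitted. — e.g. on generate_anki_clozes(-2, -2): A returns "# Stress Test Anki Cloze\n\n\n\n---\n\n", B returns "# Stress Test Anki Cloze\n\n"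
import Mathlib
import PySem

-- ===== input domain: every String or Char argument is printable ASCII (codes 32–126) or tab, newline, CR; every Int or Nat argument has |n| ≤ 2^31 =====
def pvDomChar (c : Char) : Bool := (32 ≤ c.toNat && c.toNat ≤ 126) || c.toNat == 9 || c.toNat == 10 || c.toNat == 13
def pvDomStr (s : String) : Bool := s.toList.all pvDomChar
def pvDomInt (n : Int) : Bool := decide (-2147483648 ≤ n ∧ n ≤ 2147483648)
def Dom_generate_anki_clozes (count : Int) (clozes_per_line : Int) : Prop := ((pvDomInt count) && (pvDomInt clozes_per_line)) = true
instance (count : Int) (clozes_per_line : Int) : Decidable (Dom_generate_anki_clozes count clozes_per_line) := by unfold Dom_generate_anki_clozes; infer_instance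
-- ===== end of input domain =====

-- B replaces the nested block/card loops (per-block list + join) by one flat loop over
-- global card indices with modular arithmetic choosing the cloze id and the separator
-- appended after each card; objective: simpler (one pass, one join).

-- ===== PORT A =====
def generate_anki_clozes (count : Int) (clozes_per_line : Int) : String :=
  let content := "# Stress Test Anki Cloze\n\n"
  let blocks_needed := PySem.Int.floordiv count clozes_per_line
  let st := (PySem.List.pyRange 0 blocks_needed 1).foldl
    (fun (st : String × Int) _i =>
      let inner := (PySem.List.pyRange 0 clozes_per_line 1).foldl
        (fun (st2 : List String × Int) j =>
          let cloze_id := j + 1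
          (st2.1 ++ ["Anki Card " ++ PySem.Int.toStr st2.2 ++ ": {{c" ++ PySem.Int.toStr cloze_id
                      ++ "::Test Answer " ++ PySem.Int.toStr st2.2 ++ "}}"], st2.2 + 1))
        ([], st.2)
      let line_content := PySem.Str.join "\n\n" inner.1
      (st.1 ++ (line_content ++ "\n\n---\n\n"), inner.2))
    (content, 1)
  st.1

-- ===== PORT B =====
def generate_anki_clozes_alt (count : Int) (clozes_per_line : Int) : String :=
  let header := "# Stress Test Anki Cloze\n\n"
  let blocks_needed := PySem.Int.floordiv count clozes_per_line
  if blocks_needed ≤ 0 then header else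
  let parts := (PySem.List.pyRange 1 (blocks_needed * clozes_per_line + 1) 1).foldl
    (fun (acc : List String) g =>
      let cloze_id := PySem.Int.mod (g - 1) clozes_per_line + 1
      acc ++ ["Anki Card " ++ PySem.Int.toStr g ++ ": {{c" ++ PySem.Int.toStr cloze_id
               ++ "::Test Answer " ++ PySem.Int.toStr g ++ "}}",
              if PySem.Int.mod g clozes_per_line == 0 then "\n\n---\n\n" else "\n\n"])
    []
  header ++ PySem.Str.join "" parts

-- ===== PRECONDITION & SPEC =====
-- Pre_ excludes exactly clozes_per_line = 0, where A raises ZeroDivisionError.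
def Pre_generate_anki_clozes (count : Int) (clozes_per_line : Int) : Prop :=
  clozes_per_line ≠ 0
instance (count : Int) (clozes_per_line : Int) : Decidable (Pre_generate_anki_clozes count clozes_per_line) := by
  unfold Pre_generate_anki_clozes; infer_instance

def pvWitness_generate_anki_clozes : Int × Int := (10, 3)

-- When count <= clozes_per_line <= -1 (a nonsensical negative block size), A's empty inner loop
-- returns the header plus phantom card-less separator-only '\n\n---\n\n' blocks, while B returns
-- the bare header — the natural choice on this unspecified corner, since no card can be emitted.
def D_generate_anki_clozes (count : Int) (clozes_per_line : Int) : Prop :=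
  clozes_per_line ≤ -1 ∧ count ≤ clozes_per_line
instance (count : Int) (clozes_per_line : Int) : Decidable (D_generate_anki_clozes count clozes_per_line) := by
  unfold D_generate_anki_clozes; infer_instance

def Spec_generate_anki_clozes (count : Int) (clozes_per_line : Int) (out : String) : Prop := ¬ D_generate_anki_clozes count clozes_per_line → out = generate_anki_clozes_alt count clozes_per_line

def pvDiffWitness_generate_anki_clozes : Int × Int := (-2, -2)
def pvDiffWitnessOut_generate_anki_clozes : String × String :=
  ("# Stress Test Anki Cloze\n\n\n\n---\n\n", "# Stress Test Anki Cloze\n\n")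
instance (count : Int) (clozes_per_line : Int) (out : String) : Decidable (Spec_generate_anki_clozes count clozes_per_line out) := by unfold Spec_generate_anki_clozes; infer_instance

-- ===== CLAIM (what is proved, stated in full; the proofs are below) =====
def Claim_unchanged_generate_anki_clozes : Prop := ∀ (count : Int) (clozes_per_line : Int), Dom_generate_anki_clozes count clozes_per_line → Pre_generate_anki_clozes count clozes_per_line → Spec_generate_anki_clozes count clozes_per_line (generate_anki_clozes count clozes_per_line)
def Claim_changed_generate_anki_clozes : Prop := Dom_generate_anki_clozes (pvDiffWitness_generate_anki_clozes.1) (pvDiffWitness_generate_anki_clozes.2) ∧ Pre_generate_anki_clozes (pvDiffWitness_generate_anki_clozes.1) (pvDiffWitness_generate_anki_clozes.2) ∧ D_generate_anki_clozes (pvDiffWitness_generate_anki_clozes.1) (pvDiffWitness_generate_anki_clozes.2) ∧ generate_anki_clozes (pvDiffWitness_generate_anki_clozes.1) (pvDiffWitness_generate_anki_clozes.2) = pvDiffWitnessOut_generate_anki_clozes.1 ∧ generate_anki_clozes_alt (pvDiffWitness_generate_anki_clozes.1) (pvDiffWitness_generate_anki_clozes.2) = pvDiffWitnessOut_generate_anki_clozes.2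 ∧ pvDiffWitnessOut_generate_anki_clozes.1 ≠ pvDiffWitnessOut_generate_anki_clozes.2
def Claim_exact_generate_anki_clozes : Prop := ∀ (count : Int) (clozes_per_line : Int), Dom_generate_anki_clozes count clozes_per_line → Pre_generate_anki_clozes count clozes_per_line → D_generate_anki_clozes count clozes_per_line → generate_anki_clozes count clozes_per_line ≠ generate_anki_clozes_alt count clozes_per_line

-- ===== LEMMAS AND PROOFS =====

-- the card string
def pvCard (g j : Int) : String :=
  "Anki Card " ++ PySem.Int.toStr g ++ ": {{c" ++ PySem.Int.toStr j
    ++ "::Test Answer " ++ PySem.Int.toStr g ++ "}}"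

-- the intended output after N blocks starting at global index g0, with c clozes per block
def pvT (c : Int) : Nat → Int → String
  | 0, _ => ""
  | (N+1), g0 =>
      (PySem.Str.join "\n\n" ((List.range c.toNat).map (fun (j : Nat) => pvCard (g0 + (j:Int)) ((j:Int) + 1)))
        ++ "\n\n---\n\n") ++ pvT c N (g0 + c)

theorem pv_join_nil (sep : String) : PySem.Str.join sep [] = "" := by
  simp [PySem.Str.join, PySem.Chars.join_nil]

theorem pv_join_singleton (sep p : String) : PySem.Str.join sep [p] = p := by
  simp [PySem.Str.join, PySem.Chars.join_singleton, String.ofList_toList]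

theorem pv_join_cons_cons (sep p q : String) (rest : List String) :
    PySem.Str.join sep (p :: q :: rest) = p ++ sep ++ PySem.Str.join sep (q :: rest) := by
  simp [PySem.Str.join, PySem.Chars.join_cons_cons, String.ofList_append, String.ofList_toList]
  rw [String.append_assoc]

theorem pv_joinE_cons (x : String) (l : List String) :
    PySem.Str.join "" (x :: l) = x ++ PySem.Str.join "" l := by
  cases l with
  | nil => rw [pv_join_singleton, pv_join_nil, String.append_empty]
  | cons y r =>
      rw [pv_join_cons_cons, String.append_empty]

theorem pv_joinE_append (l₁ l₂ : List String) :
    PySem.Str.join "" (l₁ ++ l₂) = PySem.Str.join "" l₁ ++ PySem.Str.join "" l₂ := by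
  induction l₁ with
  | nil => rw [List.nil_append, pv_join_nil, String.empty_append]
  | cons x r ih =>
      rw [List.cons_append, pv_joinE_cons, pv_joinE_cons, ih, String.append_assoc]

theorem pv_join_append_singleton (sep b : String) (as : List String) (h : as ≠ []) :
    PySem.Str.join sep (as ++ [b]) = PySem.Str.join sep as ++ sep ++ b := by
  induction as with
  | nil => exact absurd rfl h
  | cons a r ih =>
      cases r with
      | nil => rw [List.cons_append, List.nil_append, pv_join_cons_cons, pv_join_singleton, pv_join_singleton]
      | cons a' r' =>
          have ih' := ih (by simp)
          rw [List.cons_append] at ih'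
          rw [List.cons_append, List.cons_append, pv_join_cons_cons, ih', pv_join_cons_cons]
          simp [String.append_assoc]

-- A's inner loop: builds the list of the block's cards and advances the counter by m
theorem pv_innerA (m : Nat) (bp : List String) (g0 : Int) :
    (List.foldl
      (fun (st2 : List String × Int) (j : Int) =>
        (st2.1 ++ ["Anki Card " ++ PySem.Int.toStr st2.2 ++ ": {{c" ++ PySem.Int.toStr (j + 1)
                    ++ "::Test Answer " ++ PySem.Int.toStr st2.2 ++ "}}"], st2.2 + 1))
      (bp, g0) ((List.range m).map (fun (k : Nat) => (k : Int))))
    = (bp ++ (List.range m).map (fun (j : Nat) => pvCard (g0 + j) ((j : Int) + 1)), g0 + m) := by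
  induction m generalizing bp g0 with
  | zero => simp
  | succ m ih =>
      rw [List.range_succ, List.map_append, List.foldl_append, ih]
      simp only [List.foldl_cons, List.foldl_nil, List.map_cons, List.map_nil, Prod.mk.injEq]
      refine ⟨?_, by push_cast; ring⟩
      simp [pvCard, List.append_assoc]

-- A's inner loop, phrased on the pyRange A folds over
theorem pv_innerA' (c : Int) (hc : 1 ≤ c) (bp : List String) (g0 : Int) :
    (List.foldl
      (fun (st2 : List String × Int) (j : Int) =>
        (st2.1 ++ ["Anki Card " ++ PySem.Int.toStr st2.2 ++ ": {{c" ++ PySem.Int.toStr (j + 1)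
                    ++ "::Test Answer " ++ PySem.Int.toStr st2.2 ++ "}}"], st2.2 + 1))
      (bp, g0) (PySem.List.pyRange 0 c 1))
    = (bp ++ (List.range c.toNat).map (fun (j : Nat) => pvCard (g0 + (j:Int)) ((j:Int) + 1)), g0 + c) := by
  have hr : PySem.List.pyRange 0 c 1 = (List.range c.toNat).map (fun (k : Nat) => (k : Int)) := by
    have := PySem.List.pyRange_zero_natCast c.toNat
    rwa [Int.toNat_of_nonneg (by omega)] at this
  rw [hr, pv_innerA c.toNat bp g0]
  rw [Int.toNat_of_nonneg (by omega : (0:Int) ≤ c)]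

-- A's outer loop over any index list: appends one block per element
theorem pv_outerA (c : Int) (hc : 1 ≤ c) (l : List Int) :
    ∀ (content : String) (g0 : Int),
    (List.foldl
      (fun (st : String × Int) (_i : Int) =>
        (st.1 ++ (PySem.Str.join "\n\n"
            ((PySem.List.pyRange 0 c 1).foldl
              (fun (st2 : List String × Int) (j : Int) =>
                (st2.1 ++ ["Anki Card " ++ PySem.Int.toStr st2.2 ++ ": {{c" ++ PySem.Int.toStr (j + 1)
                            ++ "::Test Answer " ++ PySem.Int.toStr st2.2 ++ "}}"], st2.2 + 1))
              ([], st.2)).1 ++ "\n\n---\n\n"),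
         ((PySem.List.pyRange 0 c 1).foldl
              (fun (st2 : List String × Int) (j : Int) =>
                (st2.1 ++ ["Anki Card " ++ PySem.Int.toStr st2.2 ++ ": {{c" ++ PySem.Int.toStr (j + 1)
                            ++ "::Test Answer " ++ PySem.Int.toStr st2.2 ++ "}}"], st2.2 + 1))
              ([], st.2)).2))
      (content, g0) l)
    = (content ++ pvT c l.length g0, g0 + l.length * c) := by
  induction l with
  | nil => intro content g0; simp [pvT]
  | cons x r ih =>
      intro content g0
      rw [List.foldl_cons, ih]
      simp only [pv_innerA' c hc, List.nil_append, List.length_cons]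
      conv_rhs => rw [pvT]
      refine Prod.ext ?_ ?_
      · simp [String.append_assoc]
      · simp only []
        push_cast
        ring

-- B: uniform run of cards each followed by "\n\n"
theorem pv_uniform (f : Nat → String) (m : Nat) (h : 1 ≤ m) :
    PySem.Str.join "" ((List.range m).flatMap (fun j => [f j, "\n\n"]))
    = PySem.Str.join "\n\n" ((List.range m).map f) ++ "\n\n" := by
  induction m with
  | zero => omega
  | succ m ih =>
      cases Nat.eq_or_lt_of_le h with
      | inl h1 =>
          have : m = 0 := by omega
          subst this
          rw [List.range_one]
          simp only [List.flatMap_cons, List.flatMap_nil, List.append_nil, List.map_cons, List.map_nil]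
          rw [pv_joinE_cons, pv_joinE_cons, pv_join_nil, pv_join_singleton, String.append_empty]
      | inr h2 =>
          have hm : 1 ≤ m := by omega
          rw [List.range_succ, List.flatMap_append, List.map_append, pv_joinE_append, ih hm]
          simp only [List.flatMap_cons, List.flatMap_nil, List.append_nil, List.map_cons, List.map_nil]
          rw [pv_joinE_cons, pv_joinE_cons, pv_join_nil, String.append_empty]
          rw [pv_join_append_singleton "\n\n" (f m) _ (by simp; omega)]
          simp [String.append_assoc]

-- one block of B's flat list equals join-with-"\n\n" plus the block separator
theorem pv_interleave (f : Nat → String) (m : Nat) (h : 1 ≤ m) :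
    PySem.Str.join "" ((List.range m).flatMap
      (fun j => [f j, if j + 1 = m then "\n\n---\n\n" else "\n\n"]))
    = PySem.Str.join "\n\n" ((List.range m).map f) ++ "\n\n---\n\n" := by
  obtain ⟨m', rfl⟩ : ∃ m', m = m' + 1 := ⟨m - 1, by omega⟩
  rw [List.range_succ, List.flatMap_append]
  have hfirst : (List.range m').flatMap (fun j => [f j, if j + 1 = m' + 1 then "\n\n---\n\n" else "\n\n"])
      = (List.range m').flatMap (fun j => [f j, "\n\n"]) := by
    rw [List.flatMap, List.flatMap]
    congr 1
    apply List.map_congr_left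
    intro j hj
    have : j < m' := List.mem_range.mp hj
    have hne : j ≠ m' := by omega
    simp [hne]
  rw [hfirst]
  simp only [List.flatMap_cons, List.flatMap_nil, List.append_nil]
  rw [pv_joinE_append, pv_joinE_cons, pv_joinE_cons, pv_join_nil, String.append_empty]
  cases Nat.eq_zero_or_pos m' with
  | inl h0 =>
      subst h0
      simp [pv_join_nil, pv_join_singleton, String.empty_append]
  | inr hpos =>
      rw [pv_uniform f m' hpos, List.map_append]
      simp only [List.map_cons, List.map_nil]
      rw [pv_join_append_singleton "\n\n" (f m') _ (by simp [List.range_eq_nil]; omega)]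
      simp [String.append_assoc]

-- B's flat list over N blocks starting at block k equals pvT
theorem pv_outerB (c : Int) (hc : 1 ≤ c) (N : Nat) :
    ∀ (k : Int), 0 ≤ k →
    PySem.Str.join "" ((PySem.List.pyRange (k * c + 1) ((k + N) * c + 1) 1).flatMap
      (fun g => ["Anki Card " ++ PySem.Int.toStr g ++ ": {{c" ++ PySem.Int.toStr (PySem.Int.mod (g - 1) c + 1)
                  ++ "::Test Answer " ++ PySem.Int.toStr g ++ "}}",
                 if PySem.Int.mod g c == 0 then "\n\n---\n\n" else "\n\n"]))
    = pvT c N (k * c + 1) := by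
  induction N with
  | zero =>
      intro k hk
      rw [show (k + (0:Nat)) * c + 1 = k * c + 1 by push_cast; ring]
      rw [PySem.List.pyRange_one_eq_nil (le_refl _)]
      simp [pvT, pv_join_nil]
  | succ N ih =>
      intro k hk
      have hsplit : PySem.List.pyRange (k * c + 1) ((k + (N + 1 : Nat)) * c + 1) 1
          = PySem.List.pyRange (k * c + 1) ((k + 1) * c + 1) 1
            ++ PySem.List.pyRange ((k + 1) * c + 1) ((k + (N + 1 : Nat)) * c + 1) 1 := by
        apply PySem.List.pyRange_one_append
        · nlinarith
        · push_cast
          nlinarith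
      rw [hsplit, List.flatMap_append, pv_joinE_append]
      -- tail: shift to block index k+1
      have htail := ih (k + 1) (by omega)
      rw [show (k + 1 + N) * c + 1 = (k + (N + 1 : Nat)) * c + 1 by push_cast; ring] at htail
      rw [htail]
      -- head block
      have hm : (1:Nat) ≤ c.toNat := by omega
      have hrange : PySem.List.pyRange (k * c + 1) ((k + 1) * c + 1) 1
          = (List.range c.toNat).map (fun (j : Nat) => k * c + 1 + (j : Int)) := by
        rw [PySem.List.pyRange_one]
        rw [show (k + 1) * c + 1 - (k * c + 1) = c by ring]
      rw [hrange]
      rw [List.flatMap_map]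
      have hcongr : ((List.range c.toNat).flatMap
            (fun (j : Nat) => (fun g => ["Anki Card " ++ PySem.Int.toStr g ++ ": {{c" ++ PySem.Int.toStr (PySem.Int.mod (g - 1) c + 1)
                  ++ "::Test Answer " ++ PySem.Int.toStr g ++ "}}",
                 if PySem.Int.mod g c == 0 then "\n\n---\n\n" else "\n\n"]) (k * c + 1 + (j:Int))))
          = (List.range c.toNat).flatMap
            (fun (j : Nat) => [pvCard (k * c + 1 + (j:Int)) ((j:Int) + 1),
                       if j + 1 = c.toNat then "\n\n---\n\n" else "\n\n"]) := by
        rw [List.flatMap, List.flatMap]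
        congr 1
        apply List.map_congr_left
        intro j hj
        have hj' : j < c.toNat := List.mem_range.mp hj
        have hjc : (j : Int) < c := by omega
        have hmod1 : PySem.Int.mod (k * c + 1 + (j:Int) - 1) c = (j : Int) := by
          rw [PySem.Int.mod_eq_emod_of_pos (by omega)]
          rw [show k * c + 1 + (j:Int) - 1 = (j:Int) + k * c by ring]
          rw [Int.add_mul_emod_self_right]
          exact Int.emod_eq_of_lt (by omega) hjc
        have hmod2 : PySem.Int.mod (k * c + 1 + (j:Int)) c = if j + 1 = c.toNat then 0 else (j:Int) + 1 := by
          rw [PySem.Int.mod_eq_emod_of_pos (by omega)]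
          rw [show k * c + 1 + (j:Int) = ((j:Int) + 1) + k * c by ring]
          rw [Int.add_mul_emod_self_right]
          by_cases hlast : j + 1 = c.toNat
          · rw [if_pos hlast]
            rw [show ((j:Int) + 1) = c by omega]
            exact Int.emod_self
          · rw [if_neg hlast]
            exact Int.emod_eq_of_lt (by omega) (by omega)
        simp only [hmod1, hmod2]
        by_cases hlast : j + 1 = c.toNat
        · simp [hlast, pvCard]
        · have : ¬ ((j:Int) + 1 == 0) := by simp; omega
          simp [hlast, pvCard, this]
      rw [hcongr]
      rw [pv_interleave (fun (j : Nat) => pvCard (k * c + 1 + (j:Int)) ((j:Int) + 1)) c.toNat hm]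
      conv_rhs => rw [pvT]
      rw [show k * c + 1 + c = (k + 1) * c + 1 by ring]

theorem pv_A_eq (count c : Int) (hc : 1 ≤ c) :
    generate_anki_clozes count c
    = "# Stress Test Anki Cloze\n\n" ++ pvT c (PySem.Int.floordiv count c).toNat 1 := by
  unfold generate_anki_clozes
  simp only []
  rw [pv_outerA c hc]
  rw [PySem.List.length_pyRange_one]
  simp

theorem pv_B_eq (count c : Int) (hc : 1 ≤ c) :
    generate_anki_clozes_alt count c
    = "# Stress Test Anki Cloze\n\n" ++ pvT c (PySem.Int.floordiv count c).toNat 1 := by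
  unfold generate_anki_clozes_alt
  simp only []
  set n := PySem.Int.floordiv count c with hn
  split_ifs with hb
  · rw [show n.toNat = 0 by omega]
    simp [pvT]
  · rw [PySem.List.foldl_append_eq_flatMap]
    rw [List.nil_append]
    have hpos : 0 < n := by omega
    have hN : n = (n.toNat : Int) := by omega
    have := pv_outerB c hc n.toNat 0 (le_refl 0)
    rw [show ((0:Int) + (n.toNat : Int)) * c + 1 = n * c + 1 by rw [← hN]; ring] at this
    rw [show (0:Int) * c + 1 = 1 by ring] at this
    rw [this]

-- both programs when there is no full block: header only
theorem pv_eq_nonpos_blocks (count c : Int) (h0 : PySem.Int.floordiv count c ≤ 0) :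
    generate_anki_clozes count c = generate_anki_clozes_alt count c := by
  unfold generate_anki_clozes generate_anki_clozes_alt
  simp only []
  rw [PySem.List.pyRange_one_eq_nil h0, if_pos h0]
  simp

-- the separator-only string A builds per block when clozes_per_line is negative
def pvSepRep : Nat → String
  | 0 => ""
  | (k+1) => "\n\n---\n\n" ++ pvSepRep k

theorem pv_outerA_neg (c : Int) (hc : c ≤ 0) (l : List Int) :
    ∀ (content : String) (g0 : Int),
    (List.foldl
      (fun (st : String × Int) (_i : Int) =>
        (st.1 ++ (PySem.Str.join "\n\n"
            ((PySem.List.pyRange 0 c 1).foldl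
              (fun (st2 : List String × Int) (j : Int) =>
                (st2.1 ++ ["Anki Card " ++ PySem.Int.toStr st2.2 ++ ": {{c" ++ PySem.Int.toStr (j + 1)
                            ++ "::Test Answer " ++ PySem.Int.toStr st2.2 ++ "}}"], st2.2 + 1))
              ([], st.2)).1 ++ "\n\n---\n\n"),
         ((PySem.List.pyRange 0 c 1).foldl
              (fun (st2 : List String × Int) (j : Int) =>
                (st2.1 ++ ["Anki Card " ++ PySem.Int.toStr st2.2 ++ ": {{c" ++ PySem.Int.toStr (j + 1)
                            ++ "::Test Answer " ++ PySem.Int.toStr st2.2 ++ "}}"], st2.2 + 1))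
              ([], st.2)).2))
      (content, g0) l)
    = (content ++ pvSepRep l.length, g0) := by
  induction l with
  | nil => intro content g0; simp [pvSepRep]
  | cons x r ih =>
      intro content g0
      rw [List.foldl_cons, ih]
      simp only [PySem.List.pyRange_one_eq_nil hc, List.foldl_nil, pv_join_nil,
        String.empty_append]
      simp only [List.length_cons]
      rw [show pvSepRep (r.length + 1) = "\n\n---\n\n" ++ pvSepRep r.length from rfl]
      rw [String.append_assoc]

theorem pv_sepRep_len_pos (N : Nat) (h : 1 ≤ N) : 1 ≤ PySem.Str.len (pvSepRep N) := by
  obtain ⟨k, rfl⟩ : ∃ k, N = k + 1 := ⟨N - 1, by omega⟩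
  rw [show pvSepRep (k + 1) = "\n\n---\n\n" ++ pvSepRep k from rfl]
  rw [PySem.Str.len_append]
  have h1 : PySem.Str.len "\n\n---\n\n" = 7 := by decide
  have h2 : 0 ≤ PySem.Str.len (pvSepRep k) := by
    rw [PySem.Str.len_eq]; positivity
  omega

-- ===== VERDICT (by name: the statement is the Claim_ definition above) =====
theorem generate_anki_clozes_spec : Claim_unchanged_generate_anki_clozes := by
  intro count c _hdom hpre
  unfold Spec_generate_anki_clozes
  intro hnd
  by_cases hc : 1 ≤ c
  · rw [pv_A_eq count c hc, pv_B_eq count c hc]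
  · unfold Pre_generate_anki_clozes at hpre
    unfold D_generate_anki_clozes at hnd
    push_neg at hnd
    have h1 : c < count := hnd (by omega)
    have h0 : PySem.Int.floordiv count c ≤ 0 := by
      have hneg := PySem.Int.floordiv_neg_neg (-count) (-c)
      simp only [neg_neg] at hneg
      rw [hneg]
      have := (PySem.Int.floordiv_lt_iff_lt_mul (a := -count) (b := -c) (q := 1)
        (by omega : (0:Int) < -c)).mpr (by nlinarith)
      omega
    exact pv_eq_nonpos_blocks count c h0

theorem generate_anki_clozes_changed : Claim_changed_generate_anki_clozes := by
  unfold Claim_changed_generate_anki_clozes; decide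

theorem generate_anki_clozes_tight : Claim_exact_generate_anki_clozes := by
  intro count c _hdom hpre hd
  obtain ⟨hc, hcount⟩ := hd
  have hn1 : 1 ≤ PySem.Int.floordiv count c := by
    have hneg := PySem.Int.floordiv_neg_neg (-count) (-c)
    simp only [neg_neg] at hneg
    rw [hneg]
    exact (PySem.Int.le_floordiv_iff_mul_le (by omega : (0:Int) < -c)).mpr (by nlinarith)
  -- A = header ++ separators, B = header
  have hA : generate_anki_clozes count c
      = "# Stress Test Anki Cloze\n\n" ++ pvSepRep (PySem.Int.floordiv count c).toNat := by
    unfold generate_anki_clozes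
    simp only []
    rw [pv_outerA_neg c (by omega)]
    rw [PySem.List.length_pyRange_one]
    simp
  have hB : generate_anki_clozes_alt count c = "# Stress Test Anki Cloze\n\n" := by
    unfold generate_anki_clozes_alt
    simp only []
    rw [if_neg (by omega : ¬ PySem.Int.floordiv count c ≤ 0)]
    rw [PySem.List.pyRange_one_eq_nil (by nlinarith : PySem.Int.floordiv count c * c + 1 ≤ 1)]
    simp [pv_join_nil]
  rw [hA, hB]
  intro heq
  have hlen := congrArg PySem.Str.len heq
  rw [PySem.Str.len_append] at hlen
  have := pv_sepRep_len_pos (PySem.Int.floordiv count c).toNat (by omega)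
  omega
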